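-- pv_equiv track=rewrite | github.com/usey10/Algorithm_study | 프로그래머스/0/120861. 캐릭터의 좌표/캐릭터의 좌표.py | solution
-- ===== SOURCE A (Python) =====
-- def solution(keyinput, board):
--     answer = [0,0]
--     b_range = [i // 2 for i in board]
--     for i in keyinput:
--         change = 1 if i == "up" or i == "right" else -1
--         if i == "up" or i == "down":
--             if abs(answer[1] + change) <= b_range[1]:
--                 answer[1] += change
--         else:
--             if abs(answer[0] + change) <= b_range[0]:
--                 answer[0] += change
--     return answer
-- ===== SOURCE B (Python) =====
-- def _walk(deltas, r):
--     # 1D bounded walk from 0: apply each step unless it would leave [-r, r]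
--     pos = 0
--     for d in deltas:
--         nxt = pos + d
--         if abs(nxt) <= r:
--             pos = nxt
--     return pos
--
-- def solution(keyinput, board):
--     # x and y are independent: split the commands into two per-axis delta streams,
--     # then run an independent 1D bounded walk on each.
--     xs = [1 if k == "right" else -1 for k in keyinput if k not in ("up", "down")]
--     ys = [1 if k == "up" else -1 for k in keyinput if k in ("up", "down")]
--     return [_walk(xs, board[0] // 2), _walk(ys, board[1] // 2)]
-- ===== Notes on version B (the rewrite author's own statement) =====
-- stated objective: alternative
-- what changed: B exploits axis independence: it first compiles the command list into two per-axis delta streams (up/down vs everything else) and then runs an independent 1D bounded walk on each stream, instead of A's single pass over a 2D position with per-key axis/direction branching.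
-- outside the precondition, e.g. on solution([], []): A returns [0, 0], B raises IndexError; on solution(['left'], [4]): A returns [-1, 0], B raises IndexError
import Mathlib
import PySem

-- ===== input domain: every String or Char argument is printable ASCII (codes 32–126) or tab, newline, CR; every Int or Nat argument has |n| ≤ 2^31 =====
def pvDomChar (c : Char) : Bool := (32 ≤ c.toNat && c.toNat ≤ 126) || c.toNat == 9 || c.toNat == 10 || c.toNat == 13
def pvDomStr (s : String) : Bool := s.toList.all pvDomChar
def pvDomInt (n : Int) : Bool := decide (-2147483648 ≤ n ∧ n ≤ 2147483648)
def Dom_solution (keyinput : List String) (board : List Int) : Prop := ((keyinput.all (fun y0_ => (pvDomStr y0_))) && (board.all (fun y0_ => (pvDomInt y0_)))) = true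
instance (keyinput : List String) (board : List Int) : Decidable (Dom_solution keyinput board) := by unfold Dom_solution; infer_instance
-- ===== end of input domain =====

-- B exploits axis independence: it compiles the commands into two per-axis delta streams
-- and runs an independent 1D bounded walk on each (alternative decomposition, same O(n) cost).
-- ===== PORT A =====
-- answer = [0,0] is held as the pair (answer0, answer1); board indexing uses pyGet? (none = IndexError, excluded by Pre_)
def solution (keyinput : List String) (board : List Int) : List Int :=
  let brange := board.map (fun i => PySem.Int.floordiv i 2)
  let answer := keyinput.foldl (fun (answer : Int × Int) i =>
    let change : Int := if i = "up" ∨ i = "right" then 1 else -1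
    if i = "up" ∨ i = "down" then
      if |answer.2 + change| ≤ (PySem.List.pyGet? brange 1).getD 0 then
        (answer.1, answer.2 + change)
      else answer
    else
      if |answer.1 + change| ≤ (PySem.List.pyGet? brange 0).getD 0 then
        (answer.1 + change, answer.2)
      else answer) (0, 0)
  [answer.1, answer.2]

-- ===== PORT B =====
-- 1D bounded walk from 0
def bWalk (deltas : List Int) (r : Int) : Int :=
  deltas.foldl (fun pos d => let nxt := pos + d; if |nxt| ≤ r then nxt else pos) 0

def solution_alt (keyinput : List String) (board : List Int) : List Int :=
  let xs := (keyinput.filter (fun k => ¬(k = "up" ∨ k = "down"))).map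
              (fun k => if k = "right" then (1 : Int) else -1)
  let ys := (keyinput.filter (fun k => k = "up" ∨ k = "down")).map
              (fun k => if k = "up" then (1 : Int) else -1)
  [bWalk xs (PySem.Int.floordiv ((PySem.List.pyGet? board 0).getD 0) 2),
   bWalk ys (PySem.Int.floordiv ((PySem.List.pyGet? board 1).getD 0) 2)]

-- ===== PRECONDITION & SPEC =====
-- Pre_ excludes boards with fewer than two entries: there B raises IndexError up front, while A
-- indexes b_range lazily and so happens to return when no key ever touches the missing axis.
def Pre_solution (keyinput : List String) (board : List Int) : Prop := 2 ≤ board.length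
instance (keyinput : List String) (board : List Int) : Decidable (Pre_solution keyinput board) := by unfold Pre_solution; infer_instance
def pvWitness_solution : List String × List Int := (["up", "left", "zz"], [4, 3])
def Spec_solution (keyinput : List String) (board : List Int) (out : List Int) : Prop := out = solution_alt keyinput board
instance (keyinput : List String) (board : List Int) (out : List Int) : Decidable (Spec_solution keyinput board out) := by unfold Spec_solution; infer_instance

-- ===== CLAIM (what is proved, stated in full; the proofs are below) =====
def Claim_equal_solution : Prop := ∀ (keyinput : List String) (board : List Int), Dom_solution keyinput board → Pre_solution keyinput board → Spec_solution keyinput board (solution keyinput board)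

-- ===== LEMMAS AND PROOFS =====

theorem pyGet?_one_cons {α : Type} (x y : α) (xs : List α) :
    PySem.List.pyGet? (x :: y :: xs) 1 = some y := by
  have h : (1 : Nat) < (x :: y :: xs).length := by simp
  simpa using PySem.List.pyGet?_ofNat (xs := x :: y :: xs) (n := 1) h

-- step function of A's 2D fold, named for the lemmas below (same body as in `solution`)
def aStep (r0 r1 : Int) (answer : Int × Int) (i : String) : Int × Int :=
  let change : Int := if i = "up" ∨ i = "right" then 1 else -1
  if i = "up" ∨ i = "down" then
    if |answer.2 + change| ≤ r1 then (answer.1, answer.2 + change) else answer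
  else
    if |answer.1 + change| ≤ r0 then (answer.1 + change, answer.2) else answer

-- step function of the 1D walk (same body as in `bWalk`)
def bStep (r : Int) (pos d : Int) : Int :=
  let nxt := pos + d
  if |nxt| ≤ r then nxt else pos

theorem aStep_ud (r0 r1 : Int) (ans : Int × Int) (k : String) (hud : k = "up" ∨ k = "down") :
    aStep r0 r1 ans k = (ans.1, bStep r1 ans.2 (if k = "up" then (1 : Int) else -1)) := by
  have hch : (if k = "up" ∨ k = "right" then (1 : Int) else -1)
           = (if k = "up" then (1 : Int) else -1) := by
    by_cases hu : k = "up"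
    · simp [hu]
    · have hkr : ¬ k = "right" := by rcases hud with h | h <;> subst h <;> simp_all
      simp [hu, hkr]
  simp only [aStep, bStep, if_pos hud, hch]
  split_ifs <;> rfl

theorem aStep_x (r0 r1 : Int) (ans : Int × Int) (k : String) (hud : ¬(k = "up" ∨ k = "down")) :
    aStep r0 r1 ans k = (bStep r0 ans.1 (if k = "right" then (1 : Int) else -1), ans.2) := by
  have hku : ¬ k = "up" := fun h => hud (Or.inl h)
  have hch : (if k = "up" ∨ k = "right" then (1 : Int) else -1)
           = (if k = "right" then (1 : Int) else -1) := by
    by_cases hr : k = "right" <;> simp [hr, hku]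
  simp only [aStep, bStep, if_neg hud, hch]
  split_ifs <;> rfl

-- A's 2D fold from any state equals the pair of 1D walks on the two filtered delta streams
theorem fold_split (r0 r1 : Int) (ks : List String) (a b : Int) :
    ks.foldl (aStep r0 r1) (a, b)
    = (((ks.filter (fun k => ¬(k = "up" ∨ k = "down"))).map
          (fun k => if k = "right" then (1 : Int) else -1)).foldl (bStep r0) a,
       ((ks.filter (fun k => k = "up" ∨ k = "down")).map
          (fun k => if k = "up" then (1 : Int) else -1)).foldl (bStep r1) b) := by
  induction ks generalizing a b with
  | nil => rfl
  | cons k ks ih =>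
    rw [List.foldl_cons, List.filter_cons, List.filter_cons]
    by_cases hud : k = "up" ∨ k = "down"
    · rw [aStep_ud r0 r1 (a, b) k hud, decide_eq_true hud,
        decide_eq_false (fun h : ¬(k = "up" ∨ k = "down") => h hud)]
      simp only [Bool.false_eq_true, if_false, if_true, List.map_cons, List.foldl_cons]
      exact ih a (bStep r1 b (if k = "up" then 1 else -1))
    · rw [aStep_x r0 r1 (a, b) k hud, decide_eq_false hud,
        decide_eq_true (p := ¬(k = "up" ∨ k = "down")) hud]
      simp only [Bool.false_eq_true, if_false, if_true, List.map_cons, List.foldl_cons]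
      exact ih (bStep r0 a (if k = "right" then 1 else -1)) b

-- ===== VERDICT (by name: the statement is the Claim_ definition above) =====
theorem solution_spec : Claim_equal_solution := by
  intro keyinput board _ hpre
  unfold Pre_solution at hpre
  match board, hpre with
  | b0 :: b1 :: rest, _ =>
    show solution keyinput (b0 :: b1 :: rest) = solution_alt keyinput (b0 :: b1 :: rest)
    unfold solution solution_alt bWalk
    simp only [List.map_cons, PySem.List.pyGet?_zero_cons, pyGet?_one_cons, Option.getD_some]
    exact congrArg (fun z : Int × Int => ([z.1, z.2] : List Int))
      (fold_split (PySem.Int.floordiv b0 2) (PySem.Int.floordiv b1 2) keyinput 0 0)
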